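-- pv_equiv track=rewrite | github.com/ZeyuZhang1901/Texas-Holdem-RL | experiments/dqn_train.py | validate_personalities
-- ===== SOURCE A (Python) =====
-- from typing import List, Union
--
-- PERSONALITY_MAP = {
--     # Short codes to full names
--     'a': "aggressive",
--     'c': "conservative",
--     'b': "balanced",
--     # Full names to themselves for convenience
--     "aggressive": "aggressive",
--     "conservative": "conservative",
--     "balanced": "balanced"
-- }
--
-- def validate_personalities(personalities: List[str]) -> List[str]:
--     """
--     Validate and convert personality codes/names to full names
--     Args:
--         personalities: List of personality identifiers
--                       (can be either codes ['a', 'c', 'b'] or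
--                       full names ['aggressive', 'conservative', 'balanced'])
--     Returns:
--         List of full personality names
--     Raises:
--         ValueError if invalid personality identifier found
--     """
--     valid_identifiers = set(PERSONALITY_MAP.keys())
--
--     for p in personalities:
--         if p not in valid_identifiers:
--             raise ValueError(
--                 f"Invalid personality '{p}'. Must be one of: "
--                 f"codes {['a', 'c', 'b']} or "
--                 f"full names {['aggressive', 'conservative', 'balanced']}"
--             )
--
--     return [PERSONALITY_MAP[p] for p in personalities]
-- ===== SOURCE B (Python) =====
-- def validate_personalities(personalities):
--     # Recursive, no mapping table: dispatch on the first character to get the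
--     # full name, then confirm the entry is exactly the one-letter code or that
--     # full name; raise on anything else.
--     if not personalities:
--         return []
--     p = personalities[0]
--     c = p[:1]
--     if c == 'a':
--         full = "aggressive"
--     elif c == 'c':
--         full = "conservative"
--     elif c == 'b':
--         full = "balanced"
--     else:
--         full = None
--     if full is None or (len(p) != 1 and p != full):
--         raise ValueError(
--             f"Invalid personality '{p}'. Must be one of: "
--             f"codes {['a', 'c', 'b']} or "
--             f"full names {['aggressive', 'conservative', 'balanced']}"
--         )
--     return [full] + validate_personalities(personalities[1:])
-- ===== Notes on version B (the rewrite author's own statement) =====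
-- stated objective: alternative
-- what changed: Replaces A's dict plus validate-then-map two passes with a recursive single pass that uses no mapping table at all: the full name is computed by dispatching on the entry's first character and the entry is validated by comparing it against the code or that full name.
import Mathlib
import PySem

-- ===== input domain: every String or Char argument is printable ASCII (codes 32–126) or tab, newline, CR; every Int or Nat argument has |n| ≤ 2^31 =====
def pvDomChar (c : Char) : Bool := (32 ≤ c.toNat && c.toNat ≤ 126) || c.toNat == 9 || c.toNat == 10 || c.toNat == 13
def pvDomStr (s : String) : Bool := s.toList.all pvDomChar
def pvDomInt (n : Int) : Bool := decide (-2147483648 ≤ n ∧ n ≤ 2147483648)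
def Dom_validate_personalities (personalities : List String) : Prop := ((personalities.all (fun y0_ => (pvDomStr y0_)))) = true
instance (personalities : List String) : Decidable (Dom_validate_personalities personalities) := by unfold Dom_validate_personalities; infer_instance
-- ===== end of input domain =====

-- B drops A's dict and its validate-then-map passes for one recursive pass with first-character dispatch; equivalence on inputs where A returns.

-- ===== PORT A =====
-- module constant PERSONALITY_MAP used by A
def personalityMap : PySem.Dict String String :=
  PySem.Dict.ofList [("a", "aggressive"), ("c", "conservative"), ("b", "balanced"),
    ("aggressive", "aggressive"), ("conservative", "conservative"), ("balanced", "balanced")]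

-- pass 1: check every p against the key set (a failure = ValueError, excluded by Pre_); pass 2: map the dict lookups
def validate_personalities (personalities : List String) : List String :=
  let valid : PySem.Set String := PySem.Set.ofList (PySem.Dict.keys personalityMap)
  if personalities.all (fun p => PySem.Set.contains valid p) then
    personalities.map (fun p => (PySem.Dict.get? personalityMap p).getD "")
  else []  -- A raises ValueError here; excluded by Pre_

-- ===== PORT B =====
-- full name from the first character (p[:1] ported via PySem.Str.slice), then confirm p is the code or the full name;
-- none = the ValueError branch, excluded by Pre_
def fullOf (p : String) : Option String :=
  let c := PySem.Str.slice p none (some 1)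
  let full : Option String :=
    if c = "a" then some "aggressive"
    else if c = "c" then some "conservative"
    else if c = "b" then some "balanced"
    else none
  match full with
  | none => none
  | some f => if PySem.Str.len p ≠ 1 ∧ p ≠ f then none else some f

def validate_personalities_alt : List String → List String
  | [] => []
  | p :: rest =>
    match fullOf p with
    | some f => f :: validate_personalities_alt rest
    | none => []  -- B raises ValueError here; excluded by Pre_

-- ===== PRECONDITION & SPEC =====
-- Pre_ excludes exactly the inputs on which the Python raises ValueError: some entry is not a valid identifier.
def Pre_validate_personalities (personalities : List String) : Prop :=
  ∀ p ∈ personalities, p ∈ ["a", "c", "b", "aggressive", "conservative", "balanced"]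
instance (personalities : List String) : Decidable (Pre_validate_personalities personalities) := by
  unfold Pre_validate_personalities; infer_instance
def pvWitness_validate_personalities : List String := ["a", "conservative", "b"]

def Spec_validate_personalities (personalities : List String) (out : List String) : Prop := out = validate_personalities_alt personalities
instance (personalities : List String) (out : List String) : Decidable (Spec_validate_personalities personalities out) := by unfold Spec_validate_personalities; infer_instance

-- ===== CLAIM =====
def Claim_equal_validate_personalities : Prop := ∀ (personalities : List String), Dom_validate_personalities personalities → Pre_validate_personalities personalities → Spec_validate_personalities personalities (validate_personalities personalities)

-- ===== LEMMAS AND PROOFS =====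
lemma fullOf_valid (p : String)
    (hp : p ∈ ["a", "c", "b", "aggressive", "conservative", "balanced"]) :
    fullOf p = some ((PySem.Dict.get? personalityMap p).getD "") := by
  simp only [List.mem_cons, List.not_mem_nil, or_false] at hp
  rcases hp with h | h | h | h | h | h <;> subst h <;> decide

lemma alt_eq_map (personalities : List String)
    (h : ∀ p ∈ personalities, p ∈ ["a", "c", "b", "aggressive", "conservative", "balanced"]) :
    validate_personalities_alt personalities =
      personalities.map (fun p => (PySem.Dict.get? personalityMap p).getD "") := by
  induction personalities with
  | nil => rfl
  | cons p rest ih =>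
    simp only [validate_personalities_alt, fullOf_valid p (h p (by simp)), List.map_cons]
    rw [ih (fun q hq => h q (by simp [hq]))]

lemma all_valid_of_pre (personalities : List String)
    (h : Pre_validate_personalities personalities) :
    personalities.all (fun p =>
      PySem.Set.contains (PySem.Set.ofList (PySem.Dict.keys personalityMap)) p) = true := by
  rw [List.all_eq_true]
  intro p hp
  have := h p hp
  simp only [List.mem_cons, List.not_mem_nil, or_false] at this
  rcases this with h | h | h | h | h | h <;> subst h <;> decide

-- ===== VERDICT =====
theorem validate_personalities_spec : Claim_equal_validate_personalities := by
  intro personalities _ hpre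
  unfold Spec_validate_personalities validate_personalities
  rw [alt_eq_map personalities hpre]
  rw [if_pos (all_valid_of_pre personalities hpre)]
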